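-- pv_equiv track=rewrite | github.com/Atif-pixel/desktop_ai | app/brain/intent_parser.py | _strip_leading_request_phrases
-- ===== SOURCE A (Python) =====
-- def _strip_leading_request_phrases(text: str) -> str:
--     prefixes = (
--         "can you ",
--         "could you ",
--         "would you ",
--         "please ",
--         "hey ",
--     )
--
--     out = text
--     while True:
--         changed = False
--         for p in prefixes:
--             if out.startswith(p):
--                 out = out[len(p) :].lstrip()
--                 changed = True
--         if not changed:
--             break
--
--     return out
-- ===== SOURCE B (Python) =====
-- def _strip_leading_request_phrases(text: str) -> str:
--     prefixes = (
--         "can you ",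
--         "could you ",
--         "would you ",
--         "please ",
--         "hey ",
--     )
--     # Single left-to-right cursor scan: advance an index past each leading
--     # request phrase and the whitespace after it, then slice once at the end.
--     i = 0
--     n = len(text)
--     while True:
--         for p in prefixes:
--             if text.startswith(p, i):
--                 i += len(p)
--                 while i < n and text[i].isspace():
--                     i += 1
--                 break
--         else:
--             return text[i:]
-- ===== Notes on version B (the rewrite author's own statement) =====
-- stated objective: alternative
-- what changed: A repeatedly re-slices the whole string in fixed-point passes over the prefix tuple with a changed flag; B advances a single cursor index left-to-right past each leading phrase and its following whitespace and slices the string once at the end.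
import Mathlib
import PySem

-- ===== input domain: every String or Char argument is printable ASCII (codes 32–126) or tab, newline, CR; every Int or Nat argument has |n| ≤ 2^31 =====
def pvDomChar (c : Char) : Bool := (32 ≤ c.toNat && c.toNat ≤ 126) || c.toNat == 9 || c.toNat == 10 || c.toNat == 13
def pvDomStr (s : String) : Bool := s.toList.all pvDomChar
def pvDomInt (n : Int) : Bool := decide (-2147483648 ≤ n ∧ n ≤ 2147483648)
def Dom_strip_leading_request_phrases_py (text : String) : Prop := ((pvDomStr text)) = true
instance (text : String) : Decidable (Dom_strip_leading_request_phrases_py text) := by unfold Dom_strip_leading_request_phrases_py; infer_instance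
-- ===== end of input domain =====

-- B replaces A's fixed-point of whole-string re-slicing passes by a single left-to-right
-- cursor scan that slices once at the end (objective: alternative decomposition).

-- ===== PORT A =====
-- the tuple `prefixes`
def pvPrefixes : List (List Char) :=
  ["can you ".toList, "could you ".toList, "would you ".toList, "please ".toList, "hey ".toList]

-- helper cited by the ports' decreasing_by: all prefixes are nonempty
theorem pvMem_ne : ∀ p ∈ pvPrefixes, p ≠ [] := by decide

-- body of `for p in prefixes:` acting on the state (out, changed);
-- out[len(p):] is List.drop (exact: len(p) ≥ 0), .lstrip() is PySem.Chars.lstrip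
def pvPassA (st : List Char × Bool) (p : List Char) : List Char × Bool :=
  if PySem.Chars.startswith st.1 p then (PySem.Chars.lstrip (st.1.drop p.length), true) else st

-- termination helper for the `while True` loop, cited by pvLoopA's decreasing_by
theorem pvFoldl_passA_len (ps : List (List Char)) (hps : ∀ p ∈ ps, p ≠ []) :
    ∀ (s : List Char) (b : Bool),
      (ps.foldl pvPassA (s, b)).1.length ≤ s.length ∧
      ((ps.foldl pvPassA (s, b)).2 = true → b = true ∨ (ps.foldl pvPassA (s, b)).1.length < s.length) := by
  induction ps with
  | nil => intro s b; simp
  | cons p ps ih =>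
    intro s b
    have hp : p ≠ [] := hps p (by simp)
    have hps' : ∀ q ∈ ps, q ≠ [] := fun q hq => hps q (by simp [hq])
    simp only [List.foldl_cons, pvPassA]
    by_cases h : PySem.Chars.startswith s p = true
    · have hpre : p <+: s := (PySem.Chars.startswith_iff s p).mp h
      have hlen : p.length ≤ s.length := hpre.length_le
      have hplen : 0 < p.length := List.length_pos_iff.mpr hp
      have hlt : (PySem.Chars.lstrip (s.drop p.length)).length < s.length := by
        have h1 : (PySem.Chars.lstrip (s.drop p.length)).length ≤ (s.drop p.length).length := by
          show ((s.drop p.length).dropWhile PySem.Chars.isspace).length ≤ _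
          exact List.length_dropWhile_le _ _
        have h2 : (s.drop p.length).length = s.length - p.length := by simp
        omega
      have := (ih hps') (PySem.Chars.lstrip (s.drop p.length)) true
      simp only [h, if_true]
      refine ⟨by omega, fun _ => Or.inr (by omega)⟩
    · simp only [h]
      exact (ih hps') s b

-- `while True: … if not changed: break` — recursion on the string, one pass per iteration
def pvLoopA (out : List Char) : List Char :=
  let st := pvPrefixes.foldl pvPassA (out, false)
  if h : st.2 = true then pvLoopA st.1 else out
termination_by out.length
decreasing_by
  have := pvFoldl_passA_len pvPrefixes (by decide) out false
  exact (this.2 h).resolve_left (by simp)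

def strip_leading_request_phrases_py (text : String) : String :=
  String.mk (pvLoopA text.toList)

-- ===== PORT B =====
-- `for p in prefixes: if text.startswith(p, i): … break / else:` —
-- returns the first prefix of the suffix s (= text[i:]), or none (the for-else)
def pvFirstMatch (ps : List (List Char)) (s : List Char) : Option (List Char) :=
  match ps with
  | [] => none
  | p :: ps => if PySem.Chars.startswith s p then some p else pvFirstMatch ps s

theorem pvFirstMatch_some (ps : List (List Char)) (s : List Char) (p : List Char)
    (h : pvFirstMatch ps s = some p) : p ∈ ps ∧ p <+: s := by
  induction ps with
  | nil => simp [pvFirstMatch] at h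
  | cons q ps ih =>
    by_cases hq : PySem.Chars.startswith s q = true
    · simp only [pvFirstMatch, hq, if_true, Option.some.injEq] at h
      exact ⟨by simp [← h], h ▸ (PySem.Chars.startswith_iff s q).mp hq⟩
    · simp only [pvFirstMatch, hq] at h
      exact ⟨by simp [(ih h).1], (ih h).2⟩

-- `while i < n and text[i].isspace(): i += 1`
def pvSkipWs (cs : List Char) (n i : Nat) : Nat :=
  if h : i < n then
    if PySem.Chars.isspace (cs.getD i ' ') then pvSkipWs cs n (i + 1) else i
  else i
termination_by n - i

theorem pvSkipWs_ge (cs : List Char) (n i : Nat) : i ≤ pvSkipWs cs n i := by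
  fun_induction pvSkipWs with
  | case1 _ _ _ ih => omega
  | case2 => omega
  | case3 => omega

theorem pvSkipWs_le (cs : List Char) (n i : Nat) : pvSkipWs cs n i ≤ max i n := by
  fun_induction pvSkipWs with
  | case1 _ _ _ ih => omega
  | case2 => omega
  | case3 => omega

-- the outer `while True` loop of B: advance the cursor i past one phrase + whitespace per round
def pvScanB (cs : List Char) (n i : Nat) : Nat :=
  match h : pvFirstMatch pvPrefixes (cs.drop i) with
  | some p => pvScanB cs n (pvSkipWs cs n (i + p.length))
  | none => i
termination_by cs.length + n + 1 - i
decreasing_by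
  have hm := pvFirstMatch_some pvPrefixes (cs.drop i) p h
  have hne : p ≠ [] := pvMem_ne p hm.1
  have hplen : 0 < p.length := List.length_pos_iff.mpr hne
  have hlen : p.length ≤ cs.length - i := by
    have := hm.2.length_le; simpa using this
  have hi : i < cs.length := by omega
  have h1 := pvSkipWs_ge cs n (i + p.length)
  have h2 := pvSkipWs_le cs n (i + p.length)
  omega

-- final `return text[i:]` — slice with a nonnegative in-range start = drop
def strip_leading_request_phrases_py_alt (text : String) : String :=
  String.mk (text.toList.drop (pvScanB text.toList text.toList.length 0))

-- ===== PRECONDITION & SPEC =====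
def Spec_strip_leading_request_phrases_py (text : String) (out : String) : Prop := out = strip_leading_request_phrases_py_alt text
instance (text : String) (out : String) : Decidable (Spec_strip_leading_request_phrases_py text out) := by unfold Spec_strip_leading_request_phrases_py; infer_instance

-- ===== CLAIM (what is proved, stated in full; the proofs are below) =====
def Claim_equal_strip_leading_request_phrases_py : Prop := ∀ (text : String), Dom_strip_leading_request_phrases_py text → Spec_strip_leading_request_phrases_py text (strip_leading_request_phrases_py text)

-- ===== LEMMAS AND PROOFS =====

-- one rewriting step: strip the first matching prefix, then the whitespace after it
def pvStep (s : List Char) : Option (List Char) :=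
  (pvFirstMatch pvPrefixes s).map (fun p => (s.drop p.length).dropWhile PySem.Chars.isspace)

theorem pvStep_some_lt (s s' : List Char) (h : pvStep s = some s') : s'.length < s.length := by
  unfold pvStep at h
  cases hf : pvFirstMatch pvPrefixes s with
  | none => simp [hf] at h
  | some p =>
    simp only [hf, Option.map_some, Option.some.injEq] at h
    have hm := pvFirstMatch_some pvPrefixes s p hf
    have hne : p ≠ [] := pvMem_ne p hm.1
    have hplen : 0 < p.length := List.length_pos_iff.mpr hne
    have hlen : p.length ≤ s.length := hm.2.length_le
    have h1 : s'.length ≤ (s.drop p.length).length := by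
      rw [← h]; exact List.length_dropWhile_le _ _
    simp only [List.length_drop] at h1
    omega

-- the common normal form both programs compute
def pvNorm (s : List Char) : List Char :=
  match h : pvStep s with
  | some s' => pvNorm s'
  | none => s
termination_by s.length
decreasing_by exact pvStep_some_lt s s' h

theorem pvNorm_of_step (s s' : List Char) (h : pvStep s = some s') : pvNorm s = pvNorm s' := by
  rw [pvNorm, h]

theorem pvNorm_fix (s : List Char) (h : pvStep s = none) : pvNorm s = s := by
  rw [pvNorm, h]

-- no two distinct prefixes can both match (none is a prefix of another)
theorem pvNoPair (p q s : List Char) (hpq : ¬ p <+: q) (hqp : ¬ q <+: p) (hp : p <+: s) :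
    ¬ q <+: s := fun hq => (List.prefix_or_prefix_of_prefix hp hq).elim hpq hqp

-- pairwise: no prefix in the list is a prefix of a different one
theorem pvPairwise : ∀ p ∈ pvPrefixes, ∀ q ∈ pvPrefixes, p ≠ q → ¬ p <+: q := by decide

theorem pvFirstMatch_det (ps : List (List Char)) (s p : List Char)
    (hmem : p ∈ ps) (hothers : ∀ q ∈ ps, q ≠ p → PySem.Chars.startswith s q = false)
    (hsp : PySem.Chars.startswith s p = true) : pvFirstMatch ps s = some p := by
  induction ps with
  | nil => simp at hmem
  | cons q ps ih =>
    by_cases hqp : q = p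
    · subst hqp; simp [pvFirstMatch, hsp]
    · have hq : PySem.Chars.startswith s q = false := hothers q (by simp) hqp
      simp only [pvFirstMatch, hq, Bool.false_eq_true, if_false]
      exact ih ((List.mem_cons.mp hmem).resolve_left (fun h => hqp h.symm))
        (fun r hr hrp => hothers r (by simp [hr]) hrp)

-- determinism: any matching prefix from the list is THE first match
theorem pvDet (p s : List Char) (hmem : p ∈ pvPrefixes) (hp : p <+: s) :
    pvFirstMatch pvPrefixes s = some p := by
  refine pvFirstMatch_det pvPrefixes s p hmem ?_ ((PySem.Chars.startswith_iff s p).mpr hp)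
  intro q hq hqp
  have hnq : ¬ q <+: s :=
    pvNoPair p q s (pvPairwise p hmem q hq (fun h => hqp h.symm))
      (pvPairwise q hq p hmem hqp) hp
  exact Bool.eq_false_iff.mpr (fun hc => hnq ((PySem.Chars.startswith_iff s q).mp hc))

-- a pass that reports no change did nothing and nothing matches
theorem pvFoldl_true (ps : List (List Char)) (s : List Char) :
    (ps.foldl pvPassA (s, true)).2 = true := by
  induction ps generalizing s with
  | nil => simp
  | cons p ps ih =>
    simp only [List.foldl_cons, pvPassA]
    by_cases h : PySem.Chars.startswith s p = true <;> simp [h, ih]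

theorem pvFoldl_false (ps : List (List Char)) (s : List Char)
    (h : (ps.foldl pvPassA (s, false)).2 = false) :
    (ps.foldl pvPassA (s, false)).1 = s ∧ ∀ p ∈ ps, ¬ p <+: s := by
  induction ps generalizing s with
  | nil => simpa using h
  | cons p ps ih =>
    by_cases hp : PySem.Chars.startswith s p = true
    · exfalso
      simp only [List.foldl_cons, pvPassA, hp, if_true] at h
      rw [pvFoldl_true] at h; exact absurd h (by simp)
    · simp only [List.foldl_cons, pvPassA, hp] at h ⊢
      refine ⟨(ih s h).1, ?_⟩
      intro q hq
      rcases List.mem_cons.mp hq with rfl | hq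
      · exact fun hc => hp ((PySem.Chars.startswith_iff s q).mpr hc)
      · exact (ih s h).2 q hq

theorem pvFirstMatch_none (ps : List (List Char)) (s : List Char)
    (h : ∀ p ∈ ps, ¬ p <+: s) : pvFirstMatch ps s = none := by
  induction ps with
  | nil => rfl
  | cons p ps ih =>
    have : PySem.Chars.startswith s p ≠ true :=
      fun hc => h p (by simp) ((PySem.Chars.startswith_iff s p).mp hc)
    simp only [pvFirstMatch, this]
    exact ih (fun q hq => h q (by simp [hq]))

-- each pass of A preserves pvNorm
theorem pvFoldl_norm (ps : List (List Char)) (hmem : ∀ p ∈ ps, p ∈ pvPrefixes) :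
    ∀ (s : List Char) (b : Bool), pvNorm ((ps.foldl pvPassA (s, b)).1) = pvNorm s := by
  induction ps with
  | nil => intro s b; rfl
  | cons p ps ih =>
    intro s b
    have hmem' : ∀ q ∈ ps, q ∈ pvPrefixes := fun q hq => hmem q (by simp [hq])
    simp only [List.foldl_cons, pvPassA]
    by_cases h : PySem.Chars.startswith s p = true
    · have hp : p <+: s := (PySem.Chars.startswith_iff s p).mp h
      have hstep : pvStep s = some ((s.drop p.length).dropWhile PySem.Chars.isspace) := by
        unfold pvStep; rw [pvDet p s (hmem p (by simp)) hp]; rfl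
      have hl : PySem.Chars.lstrip (s.drop p.length) = (s.drop p.length).dropWhile PySem.Chars.isspace := rfl
      simp only [h, if_true, hl]
      rw [ih hmem', ← pvNorm_of_step s _ hstep]
    · simp only [h]; exact ih hmem' s b

-- A computes the normal form
theorem pvLoopA_eq_norm : ∀ (s : List Char), pvLoopA s = pvNorm s := by
  intro s
  fun_induction pvLoopA s with
  | case1 s st h ih =>
    rw [ih]
    exact pvFoldl_norm pvPrefixes (fun p hp => hp) s false
  | case2 s st h =>
    simp only [Bool.not_eq_true] at h
    refine (pvNorm_fix s ?_).symm
    have hff := pvFoldl_false pvPrefixes s h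
    simp [pvStep, pvFirstMatch_none pvPrefixes s hff.2]

-- the whitespace skip realises dropWhile on the suffix
theorem pvSkipWs_drop (cs : List Char) : ∀ (j : Nat),
    cs.drop (pvSkipWs cs cs.length j) = (cs.drop j).dropWhile PySem.Chars.isspace := by
  intro j
  fun_induction pvSkipWs cs cs.length j with
  | case1 i h hsp ih =>
    have hcons : cs.drop i = cs.getD i ' ' :: cs.drop (i + 1) := by
      rw [List.getD_eq_getElem?_getD, List.drop_eq_getElem_cons h]
      simp [List.getElem?_eq_getElem h]
    rw [ih, hcons, List.dropWhile_cons_of_pos hsp]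
  | case2 i h hsp =>
    have hcons : cs.drop i = cs.getD i ' ' :: cs.drop (i + 1) := by
      rw [List.getD_eq_getElem?_getD, List.drop_eq_getElem_cons h]
      simp [List.getElem?_eq_getElem h]
    rw [hcons, List.dropWhile_cons_of_neg (by simpa using hsp)]
  | case3 i h =>
    have : cs.drop i = [] := List.drop_eq_nil_of_le (by omega)
    simp [this]

-- B computes the normal form
theorem pvScanB_eq_norm (cs : List Char) (i : Nat) :
    cs.drop (pvScanB cs cs.length i) = pvNorm (cs.drop i) := by
  fun_induction pvScanB cs cs.length i with
  | case1 i p hfm ih =>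
    have hdd : (cs.drop i).drop p.length = cs.drop (i + p.length) := by
      rw [List.drop_drop]
    have hstep : pvStep (cs.drop i) = some ((cs.drop (i + p.length)).dropWhile PySem.Chars.isspace) := by
      simp [pvStep, hfm, hdd]
    rw [ih, pvSkipWs_drop cs (i + p.length), ← pvNorm_of_step (cs.drop i) _ hstep]
  | case2 i hfm =>
    refine (pvNorm_fix _ ?_).symm
    simp [pvStep, hfm]

-- ===== VERDICT (by name: the statement is the Claim_ definition above) =====
theorem strip_leading_request_phrases_py_spec : Claim_equal_strip_leading_request_phrases_py := by
  intro text _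
  unfold Spec_strip_leading_request_phrases_py
  unfold strip_leading_request_phrases_py strip_leading_request_phrases_py_alt
  rw [pvLoopA_eq_norm, pvScanB_eq_norm text.toList 0]
  simp
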